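-- pv_equiv track=rewrite | github.com/jflessenkemper/AOE-3-DE-Legendary-Leaders-AI | tools/validation/validate_xs_scripts.py | strip_string_literals
-- ===== SOURCE A (Python) =====
-- def strip_string_literals(code: str) -> str:
--     """Remove content inside double-quoted strings so regex scans don't match
--     words like ``ENABLED (`` that appear inside log messages."""
--     out: list[str] = []
--     i = 0
--     in_string = False
--     while i < len(code):
--         ch = code[i]
--         if in_string:
--             if ch == "\\" and i + 1 < len(code):
--                 i += 2
--                 continue
--             if ch == '"':
--                 out.append('"')
--                 in_string = False
--             i += 1
--             continue
--         if ch == '"':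
--             out.append('"')
--             in_string = True
--             i += 1
--             continue
--         out.append(ch)
--         i += 1
--     return "".join(out)
-- ===== SOURCE B (Python) =====
-- import re
--
-- _STRING_LIT = re.compile(r'"(?:\\.|[^"])*("?)', re.S)
--
-- def strip_string_literals(code: str) -> str:
--     """Remove content inside double-quoted strings so regex scans don't match
--     words like ``ENABLED (`` that appear inside log messages."""
--     return _STRING_LIT.sub(lambda m: '"' + m.group(1), code)
-- ===== Notes on version B (the rewrite author's own statement) =====
-- stated objective: idiomatic
-- what changed: Replaces the hand-rolled index/in_string state machine with a single re.sub whose pattern matches a whole string literal (escape pair first, then any non-quote char, then an optional captured closing quote) and whose replacement keeps only the quotes; the scan runs in the C regex engine instead of a per-character Python loop.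
import Mathlib
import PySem

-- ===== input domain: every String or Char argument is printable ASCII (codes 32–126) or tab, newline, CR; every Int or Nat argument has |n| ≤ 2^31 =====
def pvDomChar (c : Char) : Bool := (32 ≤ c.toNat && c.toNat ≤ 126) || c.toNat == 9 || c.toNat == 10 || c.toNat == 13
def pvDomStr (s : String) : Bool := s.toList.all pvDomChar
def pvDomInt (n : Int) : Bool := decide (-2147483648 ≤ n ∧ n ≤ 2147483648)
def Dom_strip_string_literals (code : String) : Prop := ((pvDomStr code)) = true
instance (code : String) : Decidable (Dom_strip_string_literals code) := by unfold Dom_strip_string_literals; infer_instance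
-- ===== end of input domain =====

-- B replaces A's index/in_string state machine by one regex substitution over the code (idiomatic); same O(n) cost.

-- ===== PORT A =====
-- A's while-loop: index i, in_string flag, and out accumulated by appends at the end,
-- exactly as the Python advances i by 1 or 2.
def loopA (s : List Char) (in_string : Bool) (i : Nat) (out : List Char) : List Char :=
  if h : i < s.length then
    -- ch = code[i]
    if in_string then
      if s[i] = '\\' ∧ i + 1 < s.length then
        loopA s in_string (i + 2) out                  -- i += 2; continue
      else if s[i] = '"' then
        loopA s false (i + 1) (out ++ ['"'])           -- out.append('"'); in_string = False
      else
        loopA s in_string (i + 1) out                  -- i += 1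
    else if s[i] = '"' then
      loopA s true (i + 1) (out ++ ['"'])              -- out.append('"'); in_string = True
    else
      loopA s in_string (i + 1) (out ++ [s[i]])        -- out.append(ch)
  else out
termination_by s.length - i

def strip_string_literals (code : String) : String :=
  String.ofList (loopA code.toList false 0 [])

-- ===== PORT B =====
-- Hand port of re.sub with pattern "(?:\\.|[^"])*("?) (PySem has no regex; this
-- is exact): subScanB copies text until an opening quote starts a match, litB
-- consumes the greedy star — alternative '\\.' tried first, then '[^"]' — and the
-- optional captured closing quote; the replacement emits '"' + group(1).
mutual
def litB : List Char → List Char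
  | '\\' :: _ :: rest => litB rest                         -- alternative '\\.'
  | '"' :: rest => '"' :: subScanB rest                    -- ("?) captured the close
  | _ :: rest => litB rest                                 -- alternative '[^"]'
  | [] => []                                               -- ("?) empty: unterminated
def subScanB : List Char → List Char
  | '"' :: rest => '"' :: litB rest                        -- match starts: emit '"'
  | c :: rest => c :: subScanB rest                        -- outside any match
  | [] => []
end

def strip_string_literals_alt (code : String) : String :=
  String.ofList (subScanB code.toList)

-- ===== PRECONDITION & SPEC =====
def Spec_strip_string_literals (code : String) (out : String) : Prop := out = strip_string_literals_alt code
instance (code : String) (out : String) : Decidable (Spec_strip_string_literals code out) := by unfold Spec_strip_string_literals; infer_instance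

-- ===== CLAIM (what is proved, stated in full; the proofs are below) =====
def Claim_equal_strip_string_literals : Prop := ∀ (code : String), Dom_strip_string_literals code → Spec_strip_string_literals code (strip_string_literals code)

-- ===== LEMMAS AND PROOFS =====
-- Step lemmas for B's matcher on a cons whose head is only known by (dis)equalities.
theorem litB_other (c : Char) (r : List Char) (h1 : c ≠ '\\') (h2 : c ≠ '"') :
    litB (c :: r) = litB r := by
  rw [litB.eq_def]
  split
  · rename_i heq; exact absurd (by injection heq) (fun h => h1 h)
  · rename_i heq; exact absurd (by injection heq) (fun h => h2 h)
  · rename_i heq; injection heq with _ h; rw [h]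
  · rename_i heq; exact absurd heq (by simp)

theorem litB_bs_nil : litB ['\\'] = [] := by decide

theorem subScanB_other (c : Char) (r : List Char) (h : c ≠ '"') :
    subScanB (c :: r) = c :: subScanB r := by
  rw [subScanB.eq_def]
  split
  · rename_i heq; exact absurd (by injection heq) (fun hh => h hh)
  · rename_i heq; injection heq with h1 h2; rw [h1, h2]
  · rename_i heq; exact absurd heq (by simp)

-- Invariant: the index loop of A, from position i, appends to `out` exactly what
-- B's matcher produces on the suffix `s.drop i` (litB in the in_string state,
-- subScanB otherwise).
theorem loopA_eq : ∀ (n : Nat) (s : List Char) (i : Nat) (inStr : Bool) (out : List Char),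
    s.length - i ≤ n →
    loopA s inStr i out = out ++ (if inStr then litB (s.drop i) else subScanB (s.drop i)) := by
  intro n
  induction n with
  | zero =>
    intro s i inStr out hn
    have hi : ¬ i < s.length := by omega
    rw [loopA, dif_neg hi, List.drop_eq_nil_of_le (by omega)]
    cases inStr <;> simp [litB, subScanB]
  | succ n ih =>
    intro s i inStr out hn
    by_cases hi : i < s.length
    · have hd : s.drop i = s[i] :: s.drop (i + 1) := List.drop_eq_getElem_cons hi
      cases inStr with
      | true =>
        rw [loopA, dif_pos hi, if_pos rfl]
        by_cases hb : s[i] = '\\' ∧ i + 1 < s.length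
        · -- escape pair: A skips two chars; litB's '\\.' alternative eats two
          rw [if_pos hb, ih s (i + 2) true out (by omega)]
          obtain ⟨hch, hi1⟩ := hb
          rw [hd, List.drop_eq_getElem_cons hi1, hch]
          rfl
        · rw [if_neg hb]
          by_cases hq : s[i] = '"'
          · -- closing quote
            rw [if_pos hq, ih s (i + 1) false (out ++ ['"']) (by omega), hd, hq]
            simp only [Bool.false_eq_true, if_false, litB, List.append_assoc,
              List.singleton_append]
            simp
          · rw [if_neg hq, ih s (i + 1) true out (by omega), hd]
            by_cases hbs : s[i] = '\\'
            · -- a backslash that is the last character: litB's '[^"]' branch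
              have : ¬ i + 1 < s.length := fun h => hb ⟨hbs, h⟩
              rw [List.drop_eq_nil_of_le (by omega), hbs, litB_bs_nil]
              rfl
            · rw [litB_other _ _ hbs hq]
              simp
      | false =>
        rw [loopA, dif_pos hi, if_neg (by simp)]
        by_cases hq : s[i] = '"'
        · rw [if_pos hq, ih s (i + 1) true (out ++ ['"']) (by omega), hd, hq]
          simp only [Bool.false_eq_true, if_false, subScanB, List.append_assoc,
            List.singleton_append]
          simp
        · rw [if_neg hq, ih s (i + 1) false (out ++ [s[i]]) (by omega), hd,
              subScanB_other _ _ hq]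
          simp only [Bool.false_eq_true, if_false, List.append_assoc, List.singleton_append]
    · rw [loopA, dif_neg hi, List.drop_eq_nil_of_le (by omega)]
      cases inStr <;> simp [litB, subScanB]

-- ===== VERDICT (by name: the statement is the Claim_ definition above) =====
theorem strip_string_literals_spec : Claim_equal_strip_string_literals := by
  intro code _
  unfold Spec_strip_string_literals strip_string_literals strip_string_literals_alt
  have h := loopA_eq code.toList.length code.toList 0 false [] (by omega)
  simp only [List.drop_zero, Bool.false_eq_true, if_false, List.nil_append] at h
  rw [h]
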